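-- pv_equiv track=rewrite | github.com/youssgamer80/rechercheritineraire | api_rechercher_itineraire/tests.py | depthFirst
-- ===== SOURCE A (Python) =====
-- def depthFirst(graph, currentVertex, visited, visitedList):
--
--     if currentVertex in graph:
--         visited.append(currentVertex)
--         for vertex in graph[currentVertex]:
--             if vertex not in visited:
--                 depthFirst(graph, vertex, visited.copy(), visitedList)
--         visitedList.append(visited)
--         return visitedList
--     else:
--         visited.append(currentVertex)
--         visitedList.append(visited)
--         return visitedList
-- ===== SOURCE B (Python) =====
-- def depthFirst(graph, currentVertex, visited, visitedList):
--     # iterative DFS with an explicit stack; post-order emit via a flag frame.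
--     # Equivalence is about the return value (A also mutates `visited` in place).
--     stack = [(False, currentVertex, visited)]
--     while stack:
--         emit, vertex, path = stack.pop()
--         if emit:
--             visitedList.append(path)
--         else:
--             path = path + [vertex]
--             if vertex in graph:
--                 stack.append((True, vertex, path))
--                 for nb in reversed(graph[vertex]):
--                     if nb not in path:
--                         stack.append((False, nb, path))
--             else:
--                 visitedList.append(path)
--     return visitedList
-- ===== Notes on version B (the rewrite author's own statement) =====
-- stated objective: alternative
-- what changed: Replaces A's recursion (which threads the shared visitedList accumulator through recursive calls) by an iterative DFS driven by an explicit stack of frames with a post-order emit flag, appending each path when its flag frame is popped.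
import Mathlib
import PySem

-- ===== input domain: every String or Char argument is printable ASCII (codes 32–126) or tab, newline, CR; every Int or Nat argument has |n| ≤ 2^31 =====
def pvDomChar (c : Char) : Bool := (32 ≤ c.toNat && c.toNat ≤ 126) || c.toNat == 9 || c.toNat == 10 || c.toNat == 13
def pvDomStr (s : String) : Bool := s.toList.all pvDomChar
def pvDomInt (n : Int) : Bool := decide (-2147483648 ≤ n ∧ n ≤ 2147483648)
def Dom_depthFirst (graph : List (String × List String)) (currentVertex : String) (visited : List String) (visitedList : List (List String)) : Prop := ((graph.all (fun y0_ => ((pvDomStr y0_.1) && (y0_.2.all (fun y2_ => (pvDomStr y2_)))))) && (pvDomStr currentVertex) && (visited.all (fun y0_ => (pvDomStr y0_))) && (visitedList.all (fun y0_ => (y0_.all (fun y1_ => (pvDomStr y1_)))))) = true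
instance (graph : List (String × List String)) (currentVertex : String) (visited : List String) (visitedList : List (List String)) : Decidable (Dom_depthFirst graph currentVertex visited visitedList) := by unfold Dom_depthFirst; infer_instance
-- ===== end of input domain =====

-- B replaces A's recursion by an iterative DFS over an explicit stack of frames with a
-- post-order emit flag; equivalence is about the RETURN value (A also mutates `visited`
-- and appends it by reference; B builds fresh path lists).

-- termination measure helpers: number of graph keys not yet on the current path
def pvUnseen (g : List (String × List String)) (S : List String) : Nat :=
  ((g.map Prod.fst).toFinset.filter (fun k => k ∉ S)).card

theorem pvUnseen_le (g : List (String × List String)) (S : List String) (x : String) :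
    pvUnseen g (S ++ [x]) ≤ pvUnseen g S := by
  apply Finset.card_le_card
  intro k hk
  simp only [Finset.mem_filter, List.mem_append, List.mem_singleton] at hk ⊢
  exact ⟨hk.1, fun h => hk.2 (Or.inl h)⟩

theorem pvUnseen_lt (g : List (String × List String)) (S : List String) (x : String)
    (hx : x ∈ g.map Prod.fst) (hS : x ∉ S) :
    pvUnseen g (S ++ [x]) < pvUnseen g S := by
  apply Finset.card_lt_card
  constructor
  · intro k hk
    simp only [Finset.mem_filter, List.mem_append, List.mem_singleton] at hk ⊢
    exact ⟨hk.1, fun h => hk.2 (Or.inl h)⟩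
  · intro hsub
    have hx' : x ∈ (g.map Prod.fst).toFinset.filter (fun k => k ∉ S) := by
      rw [Finset.mem_filter, List.mem_toFinset]
      exact ⟨hx, hS⟩
    exact (Finset.mem_filter.mp (hsub hx')).2
      (List.mem_append_right _ (List.mem_singleton.mpr rfl))

theorem pvLookup_mem {g : List (String × List String)} {x : String} {v : List String}
    (h : List.lookup x g = some v) : x ∈ g.map Prod.fst := by
  induction g with
  | nil => simp [List.lookup] at h
  | cons p rest ih =>
    simp only [List.lookup] at h
    simp only [List.map_cons, List.mem_cons]
    cases hxe : (x == p.1) with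
    | true => exact Or.inl (eq_of_beq hxe)
    | false => rw [hxe] at h; exact Or.inr (ih h)

-- ===== PORT A =====
mutual
-- literal transliteration of A: threads visitedList through the recursion, appends the
-- grown path after the neighbour loop (post-order)
def depthFirst (graph : List (String × List String)) (currentVertex : String) (visited : List String) (visitedList : List (List String)) : List (List String) :=
  match hl : List.lookup currentVertex graph with
  | some nbrs =>
      dfForeach graph nbrs (visited ++ [currentVertex]) visitedList ++ [visited ++ [currentVertex]]
  | none => visitedList ++ [visited ++ [currentVertex]]
termination_by (2 * pvUnseen graph (visited ++ [currentVertex]) +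
     (if (List.lookup currentVertex graph).isSome then 1 else 0),
   ((List.lookup currentVertex graph).getD []).length + 1)
decreasing_by
  apply Prod.Lex.right'
  · simp [hl]
  · simp [hl]

-- the `for vertex in graph[currentVertex]` loop of A
def dfForeach (graph : List (String × List String)) (nbs : List String) (path : List String) (visitedList : List (List String)) : List (List String) :=
  match nbs with
  | [] => visitedList
  | nb :: rest =>
      if _h : nb ∈ path then dfForeach graph rest path visitedList
      else dfForeach graph rest path (depthFirst graph nb path visitedList)
termination_by (2 * pvUnseen graph path + 1, nbs.length)
decreasing_by
  · apply Prod.Lex.right' <;> simp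
  · apply Prod.Lex.left
    cases hl : List.lookup nb graph with
    | none =>
      have := pvUnseen_le graph path nb
      simp only [hl, Option.isSome_none, Bool.false_eq_true, if_false]
      omega
    | some v =>
      have := pvUnseen_lt graph path nb (pvLookup_mem hl) _h
      simp only [hl, Option.isSome_some, if_true]
      omega
  · apply Prod.Lex.right' <;> simp
end

-- ===== PORT B =====
-- decrease of the termination measure when a fresh vertex joins the path
theorem pvMeasure2_dec (g : List (String × List String)) (S : List String) (x : String) (hx : x ∉ S) :
    2 * pvUnseen g (S ++ [x]) + (if (List.lookup x g).isSome then 1 else 0) < 2 * pvUnseen g S + 1 := by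
  cases hl : List.lookup x g with
  | none =>
    have := pvUnseen_le g S x
    simp only [Option.isSome_none, Bool.false_eq_true, if_false]
    omega
  | some w =>
    have := pvUnseen_lt g S x (pvLookup_mem hl) hx
    simp only [Option.isSome_some, if_true]
    omega

-- potential of one subtree, used only as the fuel bound of the stack loop
def pvCnt (graph : List (String × List String)) (vertex : String) (p : List String) : Nat :=
  match hl : List.lookup vertex graph with
  | none => 1
  | some nbs =>
      1 + ((nbs.filter (fun nb => nb ∉ p ++ [vertex])).attach.map
            (fun x => pvCnt graph x.1 (p ++ [vertex]))).sum
termination_by 2 * pvUnseen graph (p ++ [vertex]) + (if (List.lookup vertex graph).isSome then 1 else 0)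
decreasing_by
  have hx : x.1 ∉ p ++ [vertex] := by simpa using (List.mem_filter.mp x.2).2
  simpa only [hl, Option.isSome_some, if_true] using pvMeasure2_dec graph (p ++ [vertex]) x.1 hx

-- the `while stack:` loop of B (head of the list = top of the stack); structural
-- recursion on a fuel bound that depthFirst_alt supplies large enough to never run out
def dfLoop (graph : List (String × List String)) (fuel : Nat) (stack : List (Bool × String × List String)) (acc : List (List String)) : List (List String) :=
  match fuel, stack with
  | _, [] => acc
  | 0, _ => acc
  | f + 1, (true, _, path) :: rest => dfLoop graph f rest (acc ++ [path])
  | f + 1, (false, v, p) :: rest =>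
    match List.lookup v graph with
    | some nbs =>
        dfLoop graph f
          (nbs.reverse.foldl (fun s nb => if nb ∈ p ++ [v] then s else (false, nb, p ++ [v]) :: s)
            ((true, v, p ++ [v]) :: rest)) acc
    | none => dfLoop graph f rest (acc ++ [p ++ [v]])

def depthFirst_alt (graph : List (String × List String)) (currentVertex : String) (visited : List String) (visitedList : List (List String)) : List (List String) :=
  dfLoop graph (2 * pvCnt graph currentVertex visited) [(false, currentVertex, visited)] visitedList

-- ===== PRECONDITION & SPEC =====
def Spec_depthFirst (graph : List (String × List String)) (currentVertex : String) (visited : List String) (visitedList : List (List String)) (out : List (List String)) : Prop := out = depthFirst_alt graph currentVertex visited visitedList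
instance (graph : List (String × List String)) (currentVertex : String) (visited : List String) (visitedList : List (List String)) (out : List (List String)) : Decidable (Spec_depthFirst graph currentVertex visited visitedList out) := by unfold Spec_depthFirst; infer_instance

-- ===== CLAIM (what is proved, stated in full; the proofs are below) =====
def Claim_equal_depthFirst : Prop := ∀ (graph : List (String × List String)) (currentVertex : String) (visited : List String) (visitedList : List (List String)), Dom_depthFirst graph currentVertex visited visitedList → Spec_depthFirst graph currentVertex visited visitedList (depthFirst graph currentVertex visited visitedList)

-- ===== LEMMAS AND PROOFS =====
-- value equations of pvCnt, and positivity
theorem pvCnt_none (graph : List (String × List String)) (v : String) (p : List String)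
    (hl : List.lookup v graph = none) : pvCnt graph v p = 1 := by
  rw [pvCnt.eq_def, hl]

theorem pvCnt_some (graph : List (String × List String)) (v : String) (p : List String)
    (nbs : List String) (hl : List.lookup v graph = some nbs) :
    pvCnt graph v p
      = 1 + ((nbs.filter (fun nb => nb ∉ p ++ [v])).map (fun nb => pvCnt graph nb (p ++ [v]))).sum := by
  rw [pvCnt.eq_def, hl]
  simp

theorem pvCnt_pos (graph : List (String × List String)) (v : String) (p : List String) :
    1 ≤ pvCnt graph v p := by
  cases hl : List.lookup v graph with
  | none => rw [pvCnt_none graph v p hl]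
  | some nbs => rw [pvCnt_some graph v p nbs hl]; omega

-- weight of a stack frame / of the whole stack
def pvFrameW (graph : List (String × List String)) : Bool × String × List String → Nat
  | (true, _, _) => 1
  | (false, v, p) => 2 * pvCnt graph v p

def pvStackW (graph : List (String × List String)) (st : List (Bool × String × List String)) : Nat :=
  (st.map (pvFrameW graph)).sum

theorem pvStackW_cons (graph : List (String × List String)) (f : Bool × String × List String)
    (st : List (Bool × String × List String)) :
    pvStackW graph (f :: st) = pvFrameW graph f + pvStackW graph st := by
  simp [pvStackW]

theorem pvStackW_push (graph : List (String × List String)) (l : List String) (path : List String)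
    (st : List (Bool × String × List String)) :
    pvStackW graph (l.foldr (fun nb s => if nb ∈ path then s else (false, nb, path) :: s) st)
      = 2 * ((l.filter (fun nb => nb ∉ path)).map (fun nb => pvCnt graph nb path)).sum
        + pvStackW graph st := by
  induction l with
  | nil => simp
  | cons nb rest ih =>
    by_cases h : nb ∈ path
    · simp [List.foldr_cons, h, ih]
    · rw [List.foldr_cons, if_neg h, pvStackW_cons, ih, List.filter_cons]
      simp only [h, decide_not, not_false_iff, decide_true, if_pos,
        List.map_cons, List.sum_cons, pvFrameW]
      ring

-- proof-only denotation: the pure list of paths a subtree contributes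
mutual
def pvPaths (graph : List (String × List String)) (vertex : String) (prefix' : List String) : List (List String) :=
  match hl : List.lookup vertex graph with
  | none => [prefix' ++ [vertex]]
  | some nbrs => pvPathsL graph nbrs (prefix' ++ [vertex]) ++ [prefix' ++ [vertex]]
termination_by (2 * pvUnseen graph (prefix' ++ [vertex]) +
     (if (List.lookup vertex graph).isSome then 1 else 0),
   ((List.lookup vertex graph).getD []).length + 1)
decreasing_by
  apply Prod.Lex.right'
  · simp [hl]
  · simp [hl]

def pvPathsL (graph : List (String × List String)) (nbs : List String) (path : List String) : List (List String) :=
  match nbs with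
  | [] => []
  | nb :: rest =>
      if _h : nb ∈ path then pvPathsL graph rest path
      else pvPaths graph nb path ++ pvPathsL graph rest path
termination_by (2 * pvUnseen graph path + 1, nbs.length)
decreasing_by
  all_goals try (apply Prod.Lex.right' <;> simp)
  all_goals exact Prod.Lex.left _ _ (pvMeasure2_dec graph path nb _h)
end

-- A equals the denotation
mutual
theorem df_eq_paths (graph : List (String × List String)) (currentVertex : String) (visited : List String) (visitedList : List (List String)) :
    depthFirst graph currentVertex visited visitedList = visitedList ++ pvPaths graph currentVertex visited := by
  rw [depthFirst.eq_def, pvPaths.eq_def]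
  cases hl : List.lookup currentVertex graph with
  | none => rfl
  | some nbrs =>
    simp only [dfl_eq_pl graph nbrs (visited ++ [currentVertex]) visitedList, List.append_assoc]
termination_by (2 * pvUnseen graph (visited ++ [currentVertex]) +
     (if (List.lookup currentVertex graph).isSome then 1 else 0),
   ((List.lookup currentVertex graph).getD []).length + 1)
decreasing_by
  apply Prod.Lex.right'
  · simp [hl]
  · simp [hl]

theorem dfl_eq_pl (graph : List (String × List String)) (nbs : List String) (path : List String) (visitedList : List (List String)) :
    dfForeach graph nbs path visitedList = visitedList ++ pvPathsL graph nbs path := by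
  rw [dfForeach.eq_def, pvPathsL.eq_def]
  cases nbs with
  | nil => simp
  | cons nb rest =>
    by_cases _h : nb ∈ path
    · simp only [_h, dif_pos]
      exact dfl_eq_pl graph rest path visitedList
    · simp only [_h, dif_neg, not_false_iff]
      rw [dfl_eq_pl graph rest path (depthFirst graph nb path visitedList),
          df_eq_paths graph nb path visitedList, List.append_assoc]
termination_by (2 * pvUnseen graph path + 1, nbs.length)
decreasing_by
  all_goals try (apply Prod.Lex.right' <;> simp)
  all_goals exact Prod.Lex.left _ _ (pvMeasure2_dec graph path nb _h)
end

-- denotation of a stack frame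
def pvDenote (graph : List (String × List String)) : Bool × String × List String → List (List String)
  | (true, _, path) => [path]
  | (false, v, p) => pvPaths graph v p

theorem pvDenote_push (graph : List (String × List String)) (l : List String) (path : List String)
    (st : List (Bool × String × List String)) :
    ((l.foldr (fun nb s => if nb ∈ path then s else (false, nb, path) :: s) st).map (pvDenote graph)).flatten
      = pvPathsL graph l path ++ (st.map (pvDenote graph)).flatten := by
  induction l with
  | nil => simp [pvPathsL]
  | cons nb rest ih =>
    rw [pvPathsL.eq_def]
    by_cases h : nb ∈ path
    · simp only [List.foldr_cons, h, if_pos, dif_pos]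
      exact ih
    · simp only [List.foldr_cons, h, if_neg, dif_neg, not_false_iff,
        List.map_cons, List.flatten_cons, ih, pvDenote, List.append_assoc]

-- B's loop equals the concatenated denotation of its stack, given enough fuel
theorem dfLoop_eq (graph : List (String × List String)) : ∀ (fuel : Nat) (stack : List (Bool × String × List String)) (acc : List (List String)),
    pvStackW graph stack ≤ fuel →
    dfLoop graph fuel stack acc = acc ++ (stack.map (pvDenote graph)).flatten := by
  intro fuel
  induction fuel with
  | zero =>
    intro stack acc h
    cases stack with
    | nil => simp [dfLoop]
    | cons fr rest =>
      exfalso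
      obtain ⟨b, v, p⟩ := fr
      rw [pvStackW_cons] at h
      cases b
      · have := pvCnt_pos graph v p
        simp only [pvFrameW] at h
        omega
      · simp only [pvFrameW] at h
        omega
  | succ f ih =>
    intro stack acc h
    cases stack with
    | nil => simp [dfLoop]
    | cons fr rest =>
      obtain ⟨b, v, p⟩ := fr
      rw [pvStackW_cons] at h
      cases b with
      | true =>
        simp only [dfLoop]
        rw [ih rest (acc ++ [p]) (by simp only [pvFrameW] at h; omega)]
        simp [pvDenote]
      | false =>
        simp only [pvFrameW] at h
        cases hlook : List.lookup v graph with
        | some nbs =>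
          simp only [dfLoop, hlook]
          rw [ih _ acc ?_]
          · rw [List.foldl_reverse, pvDenote_push]
            have hp : pvPaths graph v p = pvPathsL graph nbs (p ++ [v]) ++ [p ++ [v]] := by
              rw [pvPaths.eq_def, hlook]
            simp [pvDenote, hp, List.append_assoc]
          · have hc := pvCnt_some graph v p nbs hlook
            rw [List.foldl_reverse, pvStackW_push, pvStackW_cons]
            simp only [pvFrameW]
            omega
        | none =>
          simp only [dfLoop, hlook]
          rw [ih rest (acc ++ [p ++ [v]]) (by have := pvCnt_pos graph v p; omega)]
          have hp : pvPaths graph v p = [p ++ [v]] := by rw [pvPaths.eq_def, hlook]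
          simp [pvDenote, hp]

-- ===== VERDICT (by name: the statement is the Claim_ definition above) =====
theorem depthFirst_spec : Claim_equal_depthFirst := by
  intro graph currentVertex visited visitedList _
  unfold Spec_depthFirst depthFirst_alt
  rw [df_eq_paths, dfLoop_eq graph _ _ _ (by simp [pvStackW, pvFrameW])]
  simp [pvDenote]
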